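-- pv_equiv track=rewrite | github.com/AngelFGC/AOC2015 | day17.py | knapsack01_p2_choice
-- ===== SOURCE A (Python) =====
-- from typing import List
--
-- def knapsack01_p2_choice(idx:int, amnt:int, items:List[int], cap:int, chosen:int, chosencap:int):
--     if amnt == cap and chosen == chosencap:
--         return 1
--     elif chosen >= chosencap or amnt >= cap or idx >= len(items):
--         return 0
--     else:
--         notchosen = knapsack01_p2_choice(idx + 1, amnt, items, cap, chosen, chosencap)
--         chosen = knapsack01_p2_choice(idx + 1, amnt + items[idx], items, cap, chosen + 1, chosencap)
--         return chosen + notchosen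
-- ===== SOURCE B (Python) =====
-- def knapsack01_p2_choice(idx, amnt, items, cap, chosen, chosencap):
--     n = len(items)
--     states = {(amnt, chosen): 1}
--     result = 0
--     i = idx
--     while i < n and states:
--         nxt = {}
--         for (a, c), cnt in states.items():
--             if a == cap and c == chosencap:
--                 result += cnt
--             elif c >= chosencap or a >= cap:
--                 pass
--             else:
--                 v = items[i]
--                 for key in ((a, c), (a + v, c + 1)):
--                     nxt[key] = nxt.get(key, 0) + cnt
--         states = nxt
--         i += 1
--     for (a, c), cnt in states.items():
--         if a == cap and c == chosencap:
--             result += cnt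
--     return result
-- ===== Notes on version B (the rewrite author's own statement) =====
-- stated objective: alternative
-- what changed: Replaces A's binary take/skip recursion (one call per decision path) by an iterative level-by-level sweep over the indices that keeps a dict counting how many paths reach each (sum, picked) state, merging identical states so shared sub-states are counted once per level instead of re-explored per path.
import Mathlib
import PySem

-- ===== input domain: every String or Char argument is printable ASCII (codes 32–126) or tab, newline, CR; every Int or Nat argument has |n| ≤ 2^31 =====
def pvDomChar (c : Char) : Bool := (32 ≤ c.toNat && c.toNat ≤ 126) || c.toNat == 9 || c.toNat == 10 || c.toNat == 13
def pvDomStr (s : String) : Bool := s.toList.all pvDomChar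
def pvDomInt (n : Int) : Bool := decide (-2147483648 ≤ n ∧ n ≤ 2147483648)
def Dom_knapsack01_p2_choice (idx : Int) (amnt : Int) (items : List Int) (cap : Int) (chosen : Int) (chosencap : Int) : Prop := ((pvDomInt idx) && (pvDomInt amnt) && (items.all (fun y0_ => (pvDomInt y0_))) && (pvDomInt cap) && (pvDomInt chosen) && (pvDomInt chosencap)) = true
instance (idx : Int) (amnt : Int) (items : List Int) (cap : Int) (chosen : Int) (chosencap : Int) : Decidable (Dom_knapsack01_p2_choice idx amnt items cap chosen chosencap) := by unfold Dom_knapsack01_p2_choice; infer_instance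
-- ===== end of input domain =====

-- B replaces A's take/skip recursion by an iterative level-by-level sweep that merges
-- identical (sum, picked) states in a counting dict (alternative algorithm, same results).

-- ===== PORT A =====
def knapsack01_p2_choice (idx : Int) (amnt : Int) (items : List Int) (cap : Int) (chosen : Int) (chosencap : Int) : Int :=
  if amnt = cap ∧ chosen = chosencap then 1
  else if chosencap ≤ chosen ∨ cap ≤ amnt ∨ (items.length : Int) ≤ idx then 0
  else
    let notchosen := knapsack01_p2_choice (idx + 1) amnt items cap chosen chosencap
    let ch := knapsack01_p2_choice (idx + 1) (amnt + (PySem.List.pyGet? items idx).getD 0) items cap (chosen + 1) chosencap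
    ch + notchosen
termination_by ((items.length : Int) - idx).toNat
decreasing_by all_goals omega

-- ===== PORT B =====
-- one entry of the per-level sweep: count successes, drop dead states, expand live ones
def pvEntryStep (cap chosencap : Int) (items : List Int) (i : Int)
    (acc : Int × PySem.Dict (Int × Int) Int) (e : (Int × Int) × Int) :
    Int × PySem.Dict (Int × Int) Int :=
  if e.1.1 = cap ∧ e.1.2 = chosencap then (acc.1 + e.2, acc.2)
  else if chosencap ≤ e.1.2 ∨ cap ≤ e.1.1 then acc
  else
    let v := (PySem.List.pyGet? items i).getD 0
    let d1 := acc.2.insert e.1 (acc.2.getD e.1 0 + e.2)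
    (acc.1, d1.insert (e.1.1 + v, e.1.2 + 1) (d1.getD (e.1.1 + v, e.1.2 + 1) 0 + e.2))

-- the final pass over the leftover states
def pvFinish (cap chosencap res : Int) (entries : List ((Int × Int) × Int)) : Int :=
  entries.foldl (fun r e => if e.1.1 = cap ∧ e.1.2 = chosencap then r + e.2 else r) res

-- the while loop (fuel = number of remaining indices, Python's `while i < n and states`)
def pvLoop (items : List Int) (cap chosencap : Int) (fuel : Nat) (i res : Int)
    (states : PySem.Dict (Int × Int) Int) : Int :=
  match fuel with
  | 0 => pvFinish cap chosencap res states.items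
  | fuel + 1 =>
    if i < (items.length : Int) ∧ states.items ≠ [] then
      let r := states.items.foldl (pvEntryStep cap chosencap items i) (res, PySem.Dict.empty)
      pvLoop items cap chosencap fuel (i + 1) r.1 r.2
    else pvFinish cap chosencap res states.items

def knapsack01_p2_choice_alt (idx : Int) (amnt : Int) (items : List Int) (cap : Int) (chosen : Int) (chosencap : Int) : Int :=
  pvLoop items cap chosencap ((items.length : Int) - idx).toNat idx 0
    (PySem.Dict.empty.insert (amnt, chosen) 1)

-- ===== PRECONDITION & SPEC =====
-- Pre_ excludes exactly the inputs where Python A raises IndexError (items[idx] with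
-- idx below -len(items) reached from a live start state); A returns everywhere else.
def Pre_knapsack01_p2_choice (idx : Int) (amnt : Int) (items : List Int) (cap : Int) (chosen : Int) (chosencap : Int) : Prop :=
  ¬ (idx < -(items.length : Int) ∧ chosen < chosencap ∧ amnt < cap)
instance (idx : Int) (amnt : Int) (items : List Int) (cap : Int) (chosen : Int) (chosencap : Int) : Decidable (Pre_knapsack01_p2_choice idx amnt items cap chosen chosencap) := by unfold Pre_knapsack01_p2_choice; infer_instance

def pvWitness_knapsack01_p2_choice : Int × Int × List Int × Int × Int × Int := (0, 0, [1, 2, 3], 3, 0, 2)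

def Spec_knapsack01_p2_choice (idx : Int) (amnt : Int) (items : List Int) (cap : Int) (chosen : Int) (chosencap : Int) (out : Int) : Prop := out = knapsack01_p2_choice_alt idx amnt items cap chosen chosencap
instance (idx : Int) (amnt : Int) (items : List Int) (cap : Int) (chosen : Int) (chosencap : Int) (out : Int) : Decidable (Spec_knapsack01_p2_choice idx amnt items cap chosen chosencap out) := by unfold Spec_knapsack01_p2_choice; infer_instance

-- ===== CLAIM (what is proved, stated in full; the proofs are below) =====
def Claim_equal_knapsack01_p2_choice : Prop := ∀ (idx : Int) (amnt : Int) (items : List Int) (cap : Int) (chosen : Int) (chosencap : Int), Dom_knapsack01_p2_choice idx amnt items cap chosen chosencap → Pre_knapsack01_p2_choice idx amnt items cap chosen chosencap → Spec_knapsack01_p2_choice idx amnt items cap chosen chosencap (knapsack01_p2_choice idx amnt items cap chosen chosencap)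

-- ===== LEMMAS AND PROOFS =====

-- weighted sum of A's value over the entries of a state dict
def pvWsum (g : Int × Int → Int) (l : List ((Int × Int) × Int)) : Int :=
  (l.map (fun e => e.2 * g e.1)).sum

def pvG (items : List Int) (cap chosencap i : Int) (p : Int × Int) : Int :=
  knapsack01_p2_choice i p.1 items cap p.2 chosencap

lemma pvWsum_insert (g : Int × Int → Int) (d : PySem.Dict (Int × Int) Int) (k : Int × Int) (v : Int)
    (h : d.keys.Nodup) :
    pvWsum g (d.insert k v).items = pvWsum g d.items + (v - d.getD k 0) * g k := by
  by_cases hc : d.contains k = true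
  · obtain ⟨w, hw⟩ : ∃ w, d.get? k = some w := by
      have := PySem.Dict.contains_eq_isSome_get? d k
      rw [hc] at this
      exact Option.isSome_iff_exists.mp this.symm
    have hmem : (k, w) ∈ d.items := PySem.Dict.mem_items_of_get?_eq_some d hw
    obtain ⟨pre, post, hsplit⟩ := List.append_of_mem hmem
    have hgetD : d.getD k 0 = w := PySem.Dict.getD_of_mem_items d hmem h 0
    have hnd := h
    rw [show d.keys = d.items.map Prod.fst from rfl, hsplit] at hnd
    simp only [List.map_append, List.map_cons, List.nodup_append, List.nodup_cons,
      List.mem_cons] at hnd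
    rw [PySem.Dict.items_insert_of_contains d v hc, hsplit, hgetD]
    have hpre : ∀ p ∈ pre, (p.1 == k) = false := by
      intro p hp
      simp only [beq_eq_false_iff_ne, ne_eq]
      exact hnd.2.2 p.1 (List.mem_map.mpr ⟨p, hp, rfl⟩) k (Or.inl rfl)
    have hpost : ∀ p ∈ post, (p.1 == k) = false := by
      intro p hp
      simp only [beq_eq_false_iff_ne, ne_eq]
      intro hk
      exact hnd.2.1.1 (List.mem_map.mpr ⟨p, hp, hk⟩)
    have hmpre : pre.map (fun p => if (p.1 == k) = true then (k, v) else p) = pre := by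
      calc pre.map (fun p => if (p.1 == k) = true then (k, v) else p)
          = pre.map id := List.map_congr_left (fun p hp => by simp [hpre p hp])
        _ = pre := List.map_id pre
    have hmpost : post.map (fun p => if (p.1 == k) = true then (k, v) else p) = post := by
      calc post.map (fun p => if (p.1 == k) = true then (k, v) else p)
          = post.map id := List.map_congr_left (fun p hp => by simp [hpost p hp])
        _ = post := List.map_id post
    simp only [List.map_append, List.map_cons, hmpre, hmpost, beq_self_eq_true, if_pos]
    simp only [pvWsum, List.map_append, List.map_cons, List.sum_append, List.sum_cons]
    ring
  · rw [PySem.Dict.items_insert_of_not_contains d v (by simpa using hc),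
      PySem.Dict.getD_of_not_contains d 0 (by simpa using hc)]
    simp only [pvWsum, List.map_append, List.map_cons, List.map_nil, List.sum_append,
      List.sum_cons, List.sum_nil]
    ring

lemma pvFinish_eq (items : List Int) (cap chosencap i : Int) (hi : (items.length : Int) ≤ i) :
    ∀ (l : List ((Int × Int) × Int)) (res : Int),
      pvFinish cap chosencap res l = res + pvWsum (pvG items cap chosencap i) l := by
  intro l
  induction l with
  | nil => intro res; simp [pvFinish, pvWsum]
  | cons e l ih =>
    intro res
    have hval : pvG items cap chosencap i e.1 = if e.1.1 = cap ∧ e.1.2 = chosencap then 1 else 0 := by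
      unfold pvG
      rw [knapsack01_p2_choice]
      by_cases hs : e.1.1 = cap ∧ e.1.2 = chosencap
      · rw [if_pos hs, if_pos hs]
      · rw [if_neg hs, if_pos (Or.inr (Or.inr hi)), if_neg hs]
    show pvFinish cap chosencap (if e.1.1 = cap ∧ e.1.2 = chosencap then res + e.2 else res) l = _
    rw [ih]
    simp only [pvWsum, List.map_cons, List.sum_cons]
    rw [hval]
    split_ifs with hs <;> ring

lemma pvFold_eq (items : List Int) (cap chosencap i : Int) (hi : i < (items.length : Int)) :
    ∀ (l : List ((Int × Int) × Int)) (res : Int) (d : PySem.Dict (Int × Int) Int),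
      d.keys.Nodup →
      ((l.foldl (pvEntryStep cap chosencap items i) (res, d)).1
          + pvWsum (pvG items cap chosencap (i + 1)) (l.foldl (pvEntryStep cap chosencap items i) (res, d)).2.items
        = res + pvWsum (pvG items cap chosencap (i + 1)) d.items + pvWsum (pvG items cap chosencap i) l)
      ∧ (l.foldl (pvEntryStep cap chosencap items i) (res, d)).2.keys.Nodup := by
  intro l
  induction l with
  | nil =>
    intro res d hnd
    refine ⟨?_, hnd⟩
    simp [pvWsum]
  | cons e l ih =>
    intro res d hnd
    by_cases hs : e.1.1 = cap ∧ e.1.2 = chosencap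
    · have hstep : pvEntryStep cap chosencap items i (res, d) e = (res + e.2, d) := by
        simp [pvEntryStep, hs]
      have hval : pvG items cap chosencap i e.1 = 1 := by
        unfold pvG; rw [knapsack01_p2_choice, if_pos hs]
      obtain ⟨h1, h2⟩ := ih (res + e.2) d hnd
      rw [List.foldl_cons, hstep]
      refine ⟨?_, h2⟩
      rw [h1]
      simp only [pvWsum, List.map_cons, List.sum_cons]
      rw [hval]
      ring
    · by_cases hf : chosencap ≤ e.1.2 ∨ cap ≤ e.1.1
      · have hstep : pvEntryStep cap chosencap items i (res, d) e = (res, d) := by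
          simp only [pvEntryStep, if_neg hs, if_pos hf]
        have hval : pvG items cap chosencap i e.1 = 0 := by
          unfold pvG
          rw [knapsack01_p2_choice, if_neg hs,
            if_pos (by rcases hf with hf | hf; exact Or.inl hf; exact Or.inr (Or.inl hf))]
        obtain ⟨h1, h2⟩ := ih res d hnd
        rw [List.foldl_cons, hstep]
        refine ⟨?_, h2⟩
        rw [h1]
        simp only [pvWsum, List.map_cons, List.sum_cons]
        rw [hval]
        ring
      · have hstep : pvEntryStep cap chosencap items i (res, d) e =
            (res,
              (d.insert e.1 (d.getD e.1 0 + e.2)).insert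
                (e.1.1 + (PySem.List.pyGet? items i).getD 0, e.1.2 + 1)
                ((d.insert e.1 (d.getD e.1 0 + e.2)).getD
                  (e.1.1 + (PySem.List.pyGet? items i).getD 0, e.1.2 + 1) 0 + e.2) ) := by
          simp only [pvEntryStep, if_neg hs, if_neg hf]
        have hval : pvG items cap chosencap i e.1
            = pvG items cap chosencap (i + 1) (e.1.1 + (PySem.List.pyGet? items i).getD 0, e.1.2 + 1)
              + pvG items cap chosencap (i + 1) e.1 := by
          simp only [pvG]
          rw [knapsack01_p2_choice, if_neg hs, if_neg (by omega)]
        have hnd1 : (d.insert e.1 (d.getD e.1 0 + e.2)).keys.Nodup :=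
          PySem.Dict.nodup_keys_insert d e.1 _ hnd
        have hnd2 : ((d.insert e.1 (d.getD e.1 0 + e.2)).insert
            (e.1.1 + (PySem.List.pyGet? items i).getD 0, e.1.2 + 1)
            ((d.insert e.1 (d.getD e.1 0 + e.2)).getD
              (e.1.1 + (PySem.List.pyGet? items i).getD 0, e.1.2 + 1) 0 + e.2)).keys.Nodup :=
          PySem.Dict.nodup_keys_insert _ _ _ hnd1
        have hW1 : pvWsum (pvG items cap chosencap (i + 1)) (d.insert e.1 (d.getD e.1 0 + e.2)).items
            = pvWsum (pvG items cap chosencap (i + 1)) d.items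
              + e.2 * pvG items cap chosencap (i + 1) e.1 := by
          rw [pvWsum_insert _ d e.1 _ hnd]; ring
        have hW2 : pvWsum (pvG items cap chosencap (i + 1))
              ((d.insert e.1 (d.getD e.1 0 + e.2)).insert
                (e.1.1 + (PySem.List.pyGet? items i).getD 0, e.1.2 + 1)
                ((d.insert e.1 (d.getD e.1 0 + e.2)).getD
                  (e.1.1 + (PySem.List.pyGet? items i).getD 0, e.1.2 + 1) 0 + e.2)).items
            = pvWsum (pvG items cap chosencap (i + 1)) (d.insert e.1 (d.getD e.1 0 + e.2)).items
              + e.2 * pvG items cap chosencap (i + 1)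
                  (e.1.1 + (PySem.List.pyGet? items i).getD 0, e.1.2 + 1) := by
          rw [pvWsum_insert _ _ _ _ hnd1]; ring
        obtain ⟨h1, h2⟩ := ih res _ hnd2
        rw [List.foldl_cons, hstep]
        refine ⟨?_, h2⟩
        rw [h1, hW2, hW1]
        simp only [pvWsum, List.map_cons, List.sum_cons]
        rw [hval]
        ring

lemma pvLoop_eq (items : List Int) (cap chosencap : Int) :
    ∀ (fuel : Nat) (i res : Int) (d : PySem.Dict (Int × Int) Int),
      d.keys.Nodup → (items.length : Int) - i ≤ fuel →
      pvLoop items cap chosencap fuel i res d = res + pvWsum (pvG items cap chosencap i) d.items := by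
  intro fuel
  induction fuel with
  | zero =>
    intro i res d hnd hle
    exact pvFinish_eq items cap chosencap i (by omega) d.items res
  | succ n ih =>
    intro i res d hnd hle
    rw [pvLoop]
    split
    · next h =>
      obtain ⟨hi, hne⟩ := h
      obtain ⟨h1, h2⟩ := pvFold_eq items cap chosencap i hi d.items res PySem.Dict.empty (by decide)
      rw [ih (i + 1) _ _ h2 (by omega)]
      have h0 : pvWsum (pvG items cap chosencap (i + 1))
          (PySem.Dict.empty : PySem.Dict (Int × Int) Int).items = 0 := rfl
      rw [h0] at h1
      omega
    · next h =>
      by_cases hi : i < (items.length : Int)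
      · have hd : d.items = [] := by
          by_contra hne
          exact h ⟨hi, hne⟩
        rw [hd]
        simp [pvFinish, pvWsum]
      · exact pvFinish_eq items cap chosencap i (by omega) d.items res

-- ===== VERDICT (by name: the statement is the Claim_ definition above) =====
theorem knapsack01_p2_choice_spec : Claim_equal_knapsack01_p2_choice := by
  intro idx amnt items cap chosen chosencap _ _
  unfold Spec_knapsack01_p2_choice knapsack01_p2_choice_alt
  rw [pvLoop_eq items cap chosencap _ idx 0 _ (by simp [pysem]) (by omega)]
  have hit : (PySem.Dict.empty.insert ((amnt, chosen) : Int × Int) (1 : Int)).items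
      = [((amnt, chosen), 1)] := rfl
  rw [hit]
  simp [pvWsum, pvG]
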